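-- pv_equiv track=rewrite | github.com/meiyalian/VICTweetAnalyzer | analysis/torchMoji/sentiment.py | get_exact_word
-- ===== SOURCE A (Python) =====
-- def get_exact_word(text):
--     start = -1
--     end = -1
--
--     for i in range(len(text)):
--         punctuation_index = '?.!,\'"'.find(text[i])
--         if punctuation_index == -1 and start == -1:
--             start = i
--             continue
--         if punctuation_index != -1 and start != -1:
--             end = i
--             break
--     if end != -1:
--         return text[start:end]
--     else:
--         return text[start:]
-- ===== SOURCE B (Python) =====
-- def get_exact_word(text):
--     punct = '?.!,\'"'
--     rest = text.lstrip(punct)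
--     cut = len(rest)
--     for p in punct:
--         j = rest.find(p)
--         if j != -1 and j < cut:
--             cut = j
--     return rest[:cut]
-- ===== Notes on version B (the rewrite author's own statement) =====
-- stated objective: simpler
-- what changed: A scans characters one by one with start/end sentinel flags and a break; B strips the leading punctuation with str.lstrip and then cuts at the smallest first-occurrence index (str.find) among the six punctuation marks.
-- intended difference: On nonempty strings made entirely of the punctuation ?.!,'" A returns the last character (an accident of its -1 sentinel flowing into the slice text[-1:]), while B returns the empty string, the intended 'no word present' value. — e.g. on get_exact_word("!"): A returns "!", B returns ""
import Mathlib
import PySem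

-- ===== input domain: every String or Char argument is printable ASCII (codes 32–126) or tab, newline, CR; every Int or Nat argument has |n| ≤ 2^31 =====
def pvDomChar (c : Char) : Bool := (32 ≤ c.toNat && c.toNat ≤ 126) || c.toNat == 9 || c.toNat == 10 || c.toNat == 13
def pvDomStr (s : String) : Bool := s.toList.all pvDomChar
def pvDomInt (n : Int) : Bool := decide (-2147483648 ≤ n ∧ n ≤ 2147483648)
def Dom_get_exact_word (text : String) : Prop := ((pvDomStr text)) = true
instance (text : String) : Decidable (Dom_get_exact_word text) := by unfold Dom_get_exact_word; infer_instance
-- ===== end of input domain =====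

-- B replaces A's per-character index/state-flag scan with str.lstrip plus a minimum over the six
-- punctuation marks' first occurrences (objective: simpler); on all-punctuation nonempty strings
-- B returns "" where A returns the last character (stated as the intended difference D_ below).

-- ===== PORT A =====
-- the loop 'for i in range(len(text))' with 'start'/'end' state and 'break', transcribed as structural
-- recursion over the character list carrying the running index i
def get_exact_word_loop : List Char → Nat → Int → Int → Int × Int
  | [], _, start, fin => (start, fin)
  | c :: rest, i, start, fin =>
    let pi : Int := PySem.Str.find "?.!,'\"" (String.ofList [c])
    if pi = -1 ∧ start = -1 then
      get_exact_word_loop rest (i + 1) (i : Int) fin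
    else if pi ≠ -1 ∧ start ≠ -1 then
      (start, (i : Int))
    else
      get_exact_word_loop rest (i + 1) start fin

-- the function's final 'if end != -1: return text[start:end] else: return text[start:]'
def get_exact_word_out (text : String) (r : Int × Int) : String :=
  if r.2 ≠ -1 then PySem.Str.slice text (some r.1) (some r.2)
  else PySem.Str.slice text (some r.1) none

def get_exact_word (text : String) : String :=
  get_exact_word_out text (get_exact_word_loop text.toList 0 (-1) (-1))

-- ===== PORT B =====
def get_exact_word_alt (text : String) : String :=
  let punct : String := "?.!,'\""
  -- text.lstrip(punct): ported by hand as dropWhile of membership in punct (exact for str.lstrip(chars))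
  let rest : String := String.ofList (text.toList.dropWhile (fun c => punct.toList.contains c))
  let cut : Int := punct.toList.foldl (fun cut p =>
    let j := PySem.Str.find rest (String.ofList [p])
    if j ≠ -1 ∧ j < cut then j else cut) (PySem.Str.len rest)
  PySem.Str.slice rest none (some cut)

-- ===== PRECONDITION & SPEC =====
-- the six punctuation characters of the Python constant '?.!,\'"'
def pvP : List Char := ['?', '.', '!', ',', '\'', '"']

-- On nonempty strings made entirely of the punctuation ?.!,'" A returns the last character
-- (an accident of its -1 sentinel flowing into the slice text[-1:]), while B returns the empty
-- string, the intended 'no word present' value.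
def D_get_exact_word (text : String) : Prop :=
  text.toList ≠ [] ∧ text.toList.all (fun c => pvP.contains c) = true
instance (text : String) : Decidable (D_get_exact_word text) := by unfold D_get_exact_word; infer_instance

def Spec_get_exact_word (text : String) (out : String) : Prop :=
  ¬ D_get_exact_word text → out = get_exact_word_alt text
instance (text : String) (out : String) : Decidable (Spec_get_exact_word text out) := by unfold Spec_get_exact_word; infer_instance

def pvDiffWitness_get_exact_word : String := "!"
def pvDiffWitnessOut_get_exact_word : String × String := ("!", "")

-- ===== CLAIM (what is proved, stated in full; the proofs are below) =====
def Claim_unchanged_get_exact_word : Prop := ∀ (text : String), Dom_get_exact_word text → Spec_get_exact_word text (get_exact_word text)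
def Claim_changed_get_exact_word : Prop := Dom_get_exact_word (pvDiffWitness_get_exact_word) ∧ D_get_exact_word (pvDiffWitness_get_exact_word) ∧ get_exact_word (pvDiffWitness_get_exact_word) = pvDiffWitnessOut_get_exact_word.1 ∧ get_exact_word_alt (pvDiffWitness_get_exact_word) = pvDiffWitnessOut_get_exact_word.2 ∧ pvDiffWitnessOut_get_exact_word.1 ≠ pvDiffWitnessOut_get_exact_word.2
def Claim_exact_get_exact_word : Prop := ∀ (text : String), Dom_get_exact_word text → D_get_exact_word text → get_exact_word text ≠ get_exact_word_alt text

-- ===== LEMMAS AND PROOFS =====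

def pvNp (c : Char) : Bool := !pvP.contains c

lemma pvPunct_toList : ("?.!,'\"" : String).toList = pvP := by decide

lemma pv_singleton_prefix (c : Char) (m : List Char) : [c] <+: m ↔ m.head? = some c := by
  cases m with
  | nil => simp
  | cons d m' => simp [List.cons_prefix_cons, eq_comm]

lemma pv_singleton_infix (c : Char) (m : List Char) : [c] <:+: m ↔ c ∈ m := by
  constructor
  · intro h
    exact List.singleton_sublist.mp h.sublist
  · intro h
    obtain ⟨s, t, rfl⟩ := List.append_of_mem h
    exact ⟨s, t, by simp⟩

lemma pv_find_char (c : Char) :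
    PySem.Chars.find pvP [c] = -1 ↔ pvP.contains c = false := by
  rw [PySem.Chars.find_eq_neg_one_iff, pv_singleton_infix]
  constructor
  · intro h1
    cases hcc : pvP.contains c with
    | false => rfl
    | true => exact absurd (List.contains_iff_mem.mp hcc) h1
  · intro h1 hmem
    rw [List.contains_iff_mem.mpr hmem] at h1
    exact absurd h1 (by decide)

lemma pv_takeWhile_get (q : Char → Bool) :
    ∀ (l : List Char) (j : Nat), j < (l.takeWhile q).length →
      ∃ c, l[j]? = some c ∧ q c = true := by
  intro l
  induction l with
  | nil => intro j h; simp at h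
  | cons c t ih =>
    intro j h
    by_cases hq : q c
    · cases j with
      | zero => exact ⟨c, by simp, hq⟩
      | succ j' =>
        have h' : j' < (t.takeWhile q).length := by
          simp [hq] at h
          omega
        obtain ⟨d, hd1, hd2⟩ := ih j' h'
        exact ⟨d, by simpa using hd1, hd2⟩
    · simp [hq] at h

lemma pv_takeWhile_stop (q : Char → Bool) :
    ∀ (l : List Char), (l.takeWhile q).length < l.length →
      ∃ c, l[(l.takeWhile q).length]? = some c ∧ q c = false := by
  intro l
  induction l with
  | nil => intro h; simp at h
  | cons c t ih =>
    intro h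
    by_cases hq : q c
    · have h' : (t.takeWhile q).length < t.length := by
        simp [hq] at h
        omega
      obtain ⟨d, hd1, hd2⟩ := ih h'
      refine ⟨d, ?_, hd2⟩
      simpa [List.takeWhile_cons, hq] using hd1
    · refine ⟨c, ?_, by simpa using hq⟩
      simp [hq]

lemma pv_drop_takeWhile (q : Char → Bool) (l : List Char) :
    l.drop (l.takeWhile q).length = l.dropWhile q := by
  have h : ((l.takeWhile q) ++ (l.dropWhile q)).drop (l.takeWhile q).length = l.dropWhile q :=
    List.drop_left
  rwa [List.takeWhile_append_dropWhile] at h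

-- A's loop once 'start' has been set (start ≠ -1): it scans for the first punctuation character
lemma pvA_started (s : Int) (hs : s ≠ -1) :
    ∀ (l : List Char) (i : Nat),
      get_exact_word_loop l i s (-1) =
        (s, if (l.takeWhile pvNp).length = l.length then (-1 : Int)
            else ((i : Int) + ((l.takeWhile pvNp).length : Int))) := by
  intro l
  induction l with
  | nil => intro i; simp [get_exact_word_loop]
  | cons c t ih =>
    intro i
    by_cases hcm : c ∈ pvP
    · have hc : pvP.contains c = true := List.contains_iff_mem.mpr hcm
      have hpi : ¬ (PySem.Chars.find pvP [c] = -1) := by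
        intro hh
        rw [pv_find_char, hc] at hh
        exact absurd hh (by decide)
      have hpiL : ¬ (PySem.Chars.find (['?', '.', '!', ',', '\'', '"'] : List Char) [c] = -1) := hpi
      have hstep : get_exact_word_loop (c :: t) i s (-1) = (s, (i : Int)) := by
        simp [get_exact_word_loop, hpiL, hs]
      rw [hstep]
      have hnp : pvNp c = false := by unfold pvNp; rw [hc]; rfl
      have htw : (c :: t).takeWhile pvNp = [] := by simp [hnp]
      rw [htw]
      simp
    · have hc' : pvP.contains c = false := by
        cases hcc : pvP.contains c with
        | false => rfl
        | true => exact absurd (List.contains_iff_mem.mp hcc) hcm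
      have hpi : PySem.Chars.find pvP [c] = -1 := (pv_find_char c).mpr hc'
      have hpiL : PySem.Chars.find (['?', '.', '!', ',', '\'', '"'] : List Char) [c] = -1 := hpi
      have hstep : get_exact_word_loop (c :: t) i s (-1) = get_exact_word_loop t (i + 1) s (-1) := by
        simp [get_exact_word_loop, hpiL, hs]
      rw [hstep, ih (i + 1)]
      have hnp : pvNp c = true := by unfold pvNp; rw [hc']; rfl
      have htw : (c :: t).takeWhile pvNp = c :: t.takeWhile pvNp := by
        simp [hnp]
      rw [htw]
      simp only [List.length_cons, Prod.mk.injEq, true_and]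
      split_ifs <;> omega

-- A's loop from the initial state (-1, -1)
lemma pvA_fresh :
    ∀ (l : List Char) (i : Nat),
      get_exact_word_loop l i (-1) (-1) =
        (if l.dropWhile (fun c => pvP.contains c) = [] then ((-1 : Int), (-1 : Int))
         else (((i : Int) + ((l.takeWhile (fun c => pvP.contains c)).length : Int)),
           if ((l.dropWhile (fun c => pvP.contains c)).takeWhile pvNp).length
               = (l.dropWhile (fun c => pvP.contains c)).length
           then (-1 : Int)
           else ((i : Int) + ((l.takeWhile (fun c => pvP.contains c)).length : Int)
                 + (((l.dropWhile (fun c => pvP.contains c)).takeWhile pvNp).length : Int)))) := by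
  intro l
  induction l with
  | nil => intro i; simp [get_exact_word_loop]
  | cons c t ih =>
    intro i
    by_cases hcm : c ∈ pvP
    · have hc : pvP.contains c = true := List.contains_iff_mem.mpr hcm
      have hpi : ¬ (PySem.Chars.find pvP [c] = -1) := by
        intro hh
        rw [pv_find_char, hc] at hh
        exact absurd hh (by decide)
      have hpiL : ¬ (PySem.Chars.find (['?', '.', '!', ',', '\'', '"'] : List Char) [c] = -1) := hpi
      have hstep : get_exact_word_loop (c :: t) i (-1) (-1) = get_exact_word_loop t (i + 1) (-1) (-1) := by
        simp [get_exact_word_loop, hpiL]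
      rw [hstep, ih (i + 1)]
      have hdw : (c :: t).dropWhile (fun c => pvP.contains c) = t.dropWhile (fun c => pvP.contains c) := by
        simp [hcm]
      have htw : (c :: t).takeWhile (fun c => pvP.contains c) = c :: t.takeWhile (fun c => pvP.contains c) := by
        simp [hcm]
      rw [hdw, htw]
      by_cases hd : t.dropWhile (fun c => pvP.contains c) = []
      · rw [if_pos hd, if_pos hd]
      · rw [if_neg hd, if_neg hd]
        simp only [List.length_cons, Prod.mk.injEq]
        refine ⟨by omega, ?_⟩
        split_ifs <;> omega
    · have hc' : pvP.contains c = false := by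
        cases hcc : pvP.contains c with
        | false => rfl
        | true => exact absurd (List.contains_iff_mem.mp hcc) hcm
      have hpi : PySem.Chars.find pvP [c] = -1 := (pv_find_char c).mpr hc'
      have hpiL : PySem.Chars.find (['?', '.', '!', ',', '\'', '"'] : List Char) [c] = -1 := hpi
      have hstep : get_exact_word_loop (c :: t) i (-1) (-1) = get_exact_word_loop t (i + 1) (i : Int) (-1) := by
        simp [get_exact_word_loop, hpiL]
      rw [hstep, pvA_started (i : Int) (by omega) t (i + 1)]
      have hdw : (c :: t).dropWhile (fun c => pvP.contains c) = c :: t := by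
        simp [hcm]
      have htw0 : (c :: t).takeWhile (fun c => pvP.contains c) = [] := by
        simp [hcm]
      have hnp : pvNp c = true := by unfold pvNp; rw [hc']; rfl
      have htw : (c :: t).takeWhile pvNp = c :: t.takeWhile pvNp := by
        simp [hnp]
      rw [hdw, if_neg (List.cons_ne_nil c t), htw0, htw]
      simp only [List.length_cons, List.length_nil, Prod.mk.injEq]
      refine ⟨by omega, ?_⟩
      split_ifs <;> omega

lemma pvA_fresh0 (l : List Char) :
    get_exact_word_loop l 0 (-1) (-1) =
      (if l.dropWhile (fun c => pvP.contains c) = [] then ((-1 : Int), (-1 : Int))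
       else (((l.takeWhile (fun c => pvP.contains c)).length : Int),
         if ((l.dropWhile (fun c => pvP.contains c)).takeWhile pvNp).length
             = (l.dropWhile (fun c => pvP.contains c)).length
         then (-1 : Int)
         else (((l.takeWhile (fun c => pvP.contains c)).length : Int)
               + (((l.dropWhile (fun c => pvP.contains c)).takeWhile pvNp).length : Int)))) := by
  rw [pvA_fresh l 0]
  simp only [Nat.cast_zero, zero_add]

lemma pv_out_eval (text : String) (a b : Int) :
    get_exact_word_out text (a, b) =
      if b ≠ -1 then PySem.Str.slice text (some a) (some b)
      else PySem.Str.slice text (some a) none := rfl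

-- B's inner fold body
def pvF (r : List Char) : Int → Char → Int := fun cut p =>
  if PySem.Chars.find r [p] ≠ -1 ∧ PySem.Chars.find r [p] < cut then PySem.Chars.find r [p] else cut

lemma pvF_le (r : List Char) (a : Int) (p : Char) : pvF r a p ≤ a := by
  unfold pvF
  split_ifs with h
  · exact le_of_lt h.2
  · exact le_refl a

lemma pv_foldF_le (r : List Char) : ∀ (Q : List Char) (a : Int), Q.foldl (pvF r) a ≤ a := by
  intro Q
  induction Q with
  | nil => intro a; simp
  | cons q Q' ih =>
    intro a
    calc Q'.foldl (pvF r) (pvF r a q) ≤ pvF r a q := ih _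
      _ ≤ a := pvF_le r a q

lemma pv_find_lower (r : List Char) (p : Char) (hp : p ∈ pvP)
    (h0 : 0 ≤ PySem.Chars.find r [p]) :
    ((r.takeWhile pvNp).length : Int) ≤ PySem.Chars.find r [p] := by
  by_contra hlt
  push_neg at hlt
  have hspec := PySem.Chars.find_spec (s := r) (sub := [p]) h0
  have hj : (PySem.Chars.find r [p]).toNat < (r.takeWhile pvNp).length := by omega
  obtain ⟨c, hc1, hc2⟩ := pv_takeWhile_get pvNp r _ hj
  have hhead : r[(PySem.Chars.find r [p]).toNat]? = some p := by
    rw [← List.head?_drop]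
    exact (pv_singleton_prefix p _).mp hspec.1
  rw [hhead] at hc1
  have hcp : c = p := Option.some.inj hc1.symm
  rw [hcp] at hc2
  have hcont : pvP.contains p = true := List.contains_iff_mem.mpr hp
  rw [pvNp, hcont] at hc2
  exact absurd hc2 (by decide)

lemma pv_foldF_lower (r : List Char) :
    ∀ (Q : List Char), (∀ p ∈ Q, p ∈ pvP) →
      ∀ a : Int, ((r.takeWhile pvNp).length : Int) ≤ a →
        ((r.takeWhile pvNp).length : Int) ≤ Q.foldl (pvF r) a := by
  intro Q
  induction Q with
  | nil => intro _ a ha; simpa using ha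
  | cons q Q' ih =>
    intro hQ a ha
    refine ih (fun p hp => hQ p (List.mem_cons_of_mem q hp)) (pvF r a q) ?_
    unfold pvF
    split_ifs with h
    · have h0 : 0 ≤ PySem.Chars.find r [q] := by
        have := PySem.Chars.neg_one_le_find r [q]
        omega
      exact pv_find_lower r q (hQ q (by simp)) h0
    · exact ha

lemma pv_foldF_le_find (r : List Char) :
    ∀ (Q : List Char) (a : Int) (p : Char), p ∈ Q → PySem.Chars.find r [p] ≠ -1 →
      Q.foldl (pvF r) a ≤ PySem.Chars.find r [p] := by
  intro Q
  induction Q with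
  | nil => intro a p hp; exact absurd hp (by simp)
  | cons q Q' ih =>
    intro a p hp hne
    rcases List.mem_cons.mp hp with heq | hmem
    · subst heq
      have hstep : pvF r a p ≤ PySem.Chars.find r [p] := by
        unfold pvF
        split_ifs with h
        · exact le_refl _
        · push_neg at h
          exact h hne
      calc Q'.foldl (pvF r) (pvF r a p) ≤ pvF r a p := pv_foldF_le r Q' _
        _ ≤ _ := hstep
    · exact ih (pvF r a q) p hmem hne

-- the minimum over the punctuation marks of their first occurrence is where takeWhile stops
lemma pv_cut (r : List Char) :
    pvP.foldl (pvF r) ((r.length : Int)) = ((r.takeWhile pvNp).length : Int) := by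
  have htle : (r.takeWhile pvNp).length ≤ r.length := (List.takeWhile_prefix pvNp).length_le
  have hge := pv_foldF_lower r pvP (fun p hp => hp) ((r.length : Int)) (by exact_mod_cast htle)
  by_cases ht : (r.takeWhile pvNp).length = r.length
  · have hle := pv_foldF_le r pvP ((r.length : Int))
    omega
  · have htlt : (r.takeWhile pvNp).length < r.length := lt_of_le_of_ne htle ht
    obtain ⟨c, hc1, hc2⟩ := pv_takeWhile_stop pvNp r htlt
    have hcP : c ∈ pvP := by
      have hcont : pvP.contains c = true := by
        have h2 : (!pvP.contains c) = false := by rw [← pvNp]; exact hc2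
        cases hcc : pvP.contains c with
        | true => rfl
        | false => rw [hcc] at h2; exact absurd h2 (by decide)
      exact List.contains_iff_mem.mp hcont
    have hocc : [c] <+: r.drop (r.takeWhile pvNp).length := by
      rw [pv_singleton_prefix, List.head?_drop]
      exact hc1
    have hinf : [c] <:+: r := hocc.isInfix.trans (List.drop_suffix _ _).isInfix
    have hne : PySem.Chars.find r [c] ≠ -1 := (PySem.Chars.find_ne_neg_one_iff r [c]).mpr hinf
    have h0 : 0 ≤ PySem.Chars.find r [c] := by
      have := PySem.Chars.neg_one_le_find r [c]
      omega
    have hspec := PySem.Chars.find_spec (s := r) (sub := [c]) h0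
    have hfle : PySem.Chars.find r [c] ≤ ((r.takeWhile pvNp).length : Int) := by
      by_contra hgt
      push_neg at hgt
      exact hspec.2 (r.takeWhile pvNp).length (by omega) hocc
    have hfold := pv_foldF_le_find r pvP ((r.length : Int)) c hcP hne
    omega

-- Evaluated form of port A
lemma pvA_eval (text : String) :
    get_exact_word text =
      (if text.toList.dropWhile (fun c => pvP.contains c) = [] then
        PySem.Str.slice text (some (-1)) none
       else if ((text.toList.dropWhile (fun c => pvP.contains c)).takeWhile pvNp).length
               = (text.toList.dropWhile (fun c => pvP.contains c)).length then
        PySem.Str.slice text (some ((text.toList.takeWhile (fun c => pvP.contains c)).length : Int)) none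
       else
        PySem.Str.slice text (some ((text.toList.takeWhile (fun c => pvP.contains c)).length : Int))
          (some (((text.toList.takeWhile (fun c => pvP.contains c)).length : Int)
                 + (((text.toList.dropWhile (fun c => pvP.contains c)).takeWhile pvNp).length : Int)))) := by
  unfold get_exact_word
  rw [pvA_fresh0 text.toList]
  by_cases hd : text.toList.dropWhile (fun c => pvP.contains c) = []
  · rw [if_pos hd, if_pos hd, pv_out_eval, if_neg (by omega : ¬ ((-1 : Int) ≠ -1))]
  · rw [if_neg hd, if_neg hd, pv_out_eval]
    by_cases ht : ((text.toList.dropWhile (fun c => pvP.contains c)).takeWhile pvNp).length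
        = (text.toList.dropWhile (fun c => pvP.contains c)).length
    · rw [if_pos ht, if_pos ht, if_neg (by omega : ¬ ((-1 : Int) ≠ -1))]
    · rw [if_neg ht, if_neg ht,
        if_pos (by omega : (((text.toList.takeWhile (fun c => pvP.contains c)).length : Int)
          + (((text.toList.dropWhile (fun c => pvP.contains c)).takeWhile pvNp).length : Int)) ≠ -1)]

-- Evaluated form of port B (valid for every text)
lemma pvB_eval (text : String) :
    get_exact_word_alt text =
      PySem.Str.slice (String.ofList (text.toList.dropWhile (fun c => pvP.contains c))) none
        (some (((text.toList.dropWhile (fun c => pvP.contains c)).takeWhile pvNp).length : Int)) := by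
  simp only [get_exact_word_alt, pvPunct_toList]
  have hcong : ∀ (acc : Int), ∀ p ∈ pvP,
      (if PySem.Str.find (String.ofList (text.toList.dropWhile (fun c => pvP.contains c)))
            (String.ofList [p]) ≠ -1 ∧
          PySem.Str.find (String.ofList (text.toList.dropWhile (fun c => pvP.contains c)))
            (String.ofList [p]) < acc
       then PySem.Str.find (String.ofList (text.toList.dropWhile (fun c => pvP.contains c)))
            (String.ofList [p])
       else acc)
        = pvF (text.toList.dropWhile (fun c => pvP.contains c)) acc p := by
    intro acc p _
    simp [pvF, PySem.Str.find_eq, String.toList_ofList]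
  rw [PySem.List.foldl_congr_mem _ _ _ _ hcong, PySem.Str.len_eq, String.toList_ofList, pv_cut]

lemma pv_toList_eq_nil (text : String) : text.toList = [] ↔ text = "" := by
  constructor
  · intro h
    have := congrArg String.ofList h
    simpa using this
  · rintro rfl; rfl

-- ===== VERDICT (by name: the statement is the Claim_ definition above) =====
theorem get_exact_word_spec : Claim_unchanged_get_exact_word := by
  intro text _ hnd
  rw [pvA_eval, pvB_eval]
  by_cases hd : text.toList.dropWhile (fun c => pvP.contains c) = []
  · have hall : text.toList.all (fun c => pvP.contains c) = true := by
      have := List.takeWhile_append_dropWhile (p := fun c => pvP.contains c) (l := text.toList)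
      rw [hd, List.append_nil] at this
      rw [← this]
      simp
    have hnil : text.toList = [] := by
      by_contra hne
      exact hnd ⟨hne, hall⟩
    have htxt : text = "" := (pv_toList_eq_nil text).mp hnil
    subst htxt
    decide
  · rw [if_neg hd]
    have hdrop : text.toList.drop (text.toList.takeWhile (fun c => pvP.contains c)).length
        = text.toList.dropWhile (fun c => pvP.contains c) :=
      pv_drop_takeWhile (fun c => pvP.contains c) text.toList
    by_cases ht : ((text.toList.dropWhile (fun c => pvP.contains c)).takeWhile pvNp).length
        = (text.toList.dropWhile (fun c => pvP.contains c)).length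
    · rw [if_pos ht]
      apply String.toList_inj.mp
      rw [PySem.Str.toList_slice, PySem.Str.toList_slice]
      rw [PySem.Chars.slice_eq_listSlice, PySem.Chars.slice_eq_listSlice, String.toList_ofList]
      rw [PySem.List.slice_from_natCast, PySem.List.slice_to_natCast, hdrop, ht, List.take_length]
    · rw [if_neg ht]
      apply String.toList_inj.mp
      rw [PySem.Str.toList_slice, PySem.Str.toList_slice]
      rw [PySem.Chars.slice_eq_listSlice, PySem.Chars.slice_eq_listSlice, String.toList_ofList]
      rw [PySem.List.slice_natCast_add, PySem.List.slice_to_natCast, hdrop]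

theorem get_exact_word_changed : Claim_changed_get_exact_word := by
  unfold Claim_changed_get_exact_word; decide

theorem get_exact_word_tight : Claim_exact_get_exact_word := by
  intro text _ hD heq
  obtain ⟨hne, hall⟩ := hD
  have hd : text.toList.dropWhile (fun c => pvP.contains c) = [] := by
    apply List.dropWhile_eq_nil_iff.mpr
    intro x hx
    simpa using (List.all_eq_true.mp hall x hx)
  rw [pvA_eval, if_pos hd, pvB_eval, hd] at heq
  have h1 := congrArg (fun s => s.toList.length) heq
  simp only [PySem.Str.toList_slice, PySem.Chars.slice_eq_listSlice, String.toList_ofList] at h1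
  rw [PySem.List.slice_from_neg_one] at h1
  have hlen : 0 < text.toList.length := List.length_pos_of_ne_nil hne
  rw [List.length_drop] at h1
  have h2 : PySem.List.slice ([] : List Char) none
      (some ((((([] : List Char)).takeWhile pvNp).length : Int))) = [] := by decide
  rw [h2] at h1
  simp only [List.length_nil] at h1
  omega
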